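-- pv_equiv track=rewrite | github.com/EliasAroni2000/automatas | Aroni-tp1-v2.py | tokenIf
-- ===== SOURCE A (Python) =====
-- estado_final = "estado final"
--
-- estadoNoFinal = "estado no aceptado"
--
-- estadoTrampa = "estado trampa"
--
-- def tokenIf(lexema):
--     estado = 0
--     estadoFinal = [2]
--     caracter = {0:{'i':1},1:{'f':2},2:{}}
--     for c in lexema:
--         if c in caracter[estado]:
--             estado = caracter[estado][c]
--         else:
--             estado = -1
--             break
--     if estado == -1:
--         return estadoTrampa
--     if estado in estadoFinal:
--         return estado_final
--     else:
--         return estadoNoFinal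
-- ===== SOURCE B (Python) =====
-- estado_final = "estado final"
--
-- estadoNoFinal = "estado no aceptado"
--
-- estadoTrampa = "estado trampa"
--
-- def tokenIf(lexema):
--     if lexema == "if":
--         return estado_final
--     if "if".startswith(lexema):
--         return estadoNoFinal
--     return estadoTrampa
-- ===== Notes on version B (the rewrite author's own statement) =====
-- stated objective: idiomatic
-- what changed: Replaced the DFA transition table and per-character state loop with a direct classification of lexema as the target keyword, one of its proper prefixes, or anything else.
import Mathlib
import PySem

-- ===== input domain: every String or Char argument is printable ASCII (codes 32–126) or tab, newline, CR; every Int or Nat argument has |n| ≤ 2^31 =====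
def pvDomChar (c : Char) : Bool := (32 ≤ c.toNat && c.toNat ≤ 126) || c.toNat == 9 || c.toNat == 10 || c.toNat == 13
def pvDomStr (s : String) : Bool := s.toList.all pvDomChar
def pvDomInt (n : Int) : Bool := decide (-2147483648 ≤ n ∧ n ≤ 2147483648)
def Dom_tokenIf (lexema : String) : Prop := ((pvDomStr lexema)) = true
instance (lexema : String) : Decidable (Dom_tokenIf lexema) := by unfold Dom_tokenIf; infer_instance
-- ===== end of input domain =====

-- B replaces the DFA table + per-character loop with a direct comparison of lexema against "if" (idiomatic, no loop).

-- ===== PORT A =====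
-- the dict caracter = {0:{'i':1},1:{'f':2},2:{}} as a lookup: some = the transition, none = 'c not in caracter[estado]'
def tokenIfDelta (estado : Int) (c : Char) : Option Int :=
  if estado = 0 then (if c = 'i' then some 1 else none)
  else if estado = 1 then (if c = 'f' then some 2 else none)
  else none

-- the 'for c in lexema' loop with its break-to-(-1)
def tokenIfLoop (estado : Int) : List Char → Int
  | [] => estado
  | c :: cs =>
    match tokenIfDelta estado c with
    | some s => tokenIfLoop s cs
    | none => -1

def tokenIf (lexema : String) : String :=
  let estado := tokenIfLoop 0 lexema.toList
  if estado = -1 then "estado trampa"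
  else if estado = 2 then "estado final"
  else "estado no aceptado"

-- ===== PORT B =====
def tokenIf_alt (lexema : String) : String :=
  if lexema = "if" then "estado final"
  else if PySem.Str.startswith "if" lexema then "estado no aceptado"
  else "estado trampa"

-- ===== PRECONDITION & SPEC =====
def Spec_tokenIf (lexema : String) (out : String) : Prop := out = tokenIf_alt lexema
instance (lexema : String) (out : String) : Decidable (Spec_tokenIf lexema out) := by unfold Spec_tokenIf; infer_instance

-- ===== CLAIM (what is proved, stated in full; the proofs are below) =====
def Claim_equal_tokenIf : Prop := ∀ (lexema : String), Dom_tokenIf lexema → Spec_tokenIf lexema (tokenIf lexema)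

-- ===== LEMMAS AND PROOFS =====

theorem tokenIf_eq_alt (lexema : String) : tokenIf lexema = tokenIf_alt lexema := by
  have hif : (lexema = "if") ↔ lexema.toList = ['i', 'f'] := by
    rw [show (['i', 'f'] : List Char) = "if".toList from rfl, String.toList_inj]
  unfold tokenIf tokenIf_alt
  rcases hl : lexema.toList with _ | ⟨c, _ | ⟨d, rest⟩⟩
  · -- empty string: state 0
    simp [hl, tokenIfLoop, hif, PySem.Chars.startswith_iff]
  · -- one character
    by_cases hc : c = 'i' <;>
      simp [hl, tokenIfLoop, tokenIfDelta, hc, hif, PySem.Chars.startswith_iff, List.cons_prefix_cons]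
  · -- two or more characters
    by_cases hc : c = 'i'
    · by_cases hd : d = 'f'
      · cases rest with
        | nil => simp [hl, tokenIfLoop, tokenIfDelta, hc, hd, hif, PySem.Chars.startswith_iff]
        | cons e tl =>
          simp [hl, tokenIfLoop, tokenIfDelta, hc, hd, hif, PySem.Chars.startswith_iff, List.cons_prefix_cons]
      · simp [hl, tokenIfLoop, tokenIfDelta, hc, hd, hif, PySem.Chars.startswith_iff, List.cons_prefix_cons]
    · simp [hl, tokenIfLoop, tokenIfDelta, hc, hif, PySem.Chars.startswith_iff, List.cons_prefix_cons]

-- ===== VERDICT (by name: the statement is the Claim_ definition above) =====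
theorem tokenIf_spec : Claim_equal_tokenIf := by
  intro lexema _
  unfold Spec_tokenIf
  exact tokenIf_eq_alt lexema
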